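-- pv_equiv track=rewrite | github.com/ninacatcoin/ninacatcoin | extract_training_data.py | compute_hash_entropy
-- ===== SOURCE A (Python) =====
-- def compute_hash_entropy(hash_hex: str) -> int:
--     """
--     Compute bit transitions in a block hash.
--     Real entropy measurement — counts how many times consecutive bits differ.
--     """
--     if not hash_hex or len(hash_hex) < 8:
--         return 0
--
--     try:
--         # Convert hex to binary string
--         hash_int = int(hash_hex, 16)
--         bit_length = len(hash_hex) * 4  # each hex char = 4 bits
--         binary = format(hash_int, f'0{bit_length}b')
--
--         # Count transitions (0→1 or 1→0)
--         transitions = sum(1 for i in range(1, len(binary)) if binary[i] != binary[i-1])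
--         return transitions
--     except (ValueError, OverflowError):
--         return 128  # default for 256-bit hash
-- ===== SOURCE B (Python) =====
-- def compute_hash_entropy(hash_hex: str) -> int:
--     if len(hash_hex) < 8:
--         return 0
--     try:
--         x = int(hash_hex, 16)
--     except ValueError:
--         return 128
--     w = len(hash_hex) * 4
--     # A w-bit field has w-1 adjacent bit pairs; a pair differs exactly where the
--     # Gray code x ^ (x >> 1) has a 1 bit, so the transition count is a popcount.
--     return bin((x ^ (x >> 1)) & ((1 << (w - 1)) - 1)).count('1')
-- ===== Notes on version B (the rewrite author's own statement) =====
-- stated objective: faster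
-- what changed: Replaces building a zero-padded binary string and scanning adjacent characters with a popcount of the Gray code x ^ (x >> 1) masked to the field's w-1 adjacent bit pairs; Pre_ excludes strings of length >= 8 that parse to a negative hex value, where counting the boundary after the formatted minus sign as a transition (A) is as arbitrary as counting Gray-code bits of the truncated field (B).
-- outside the precondition, e.g. on compute_hash_entropy('-0000001'): A returns 2, B returns 0
import Mathlib
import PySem

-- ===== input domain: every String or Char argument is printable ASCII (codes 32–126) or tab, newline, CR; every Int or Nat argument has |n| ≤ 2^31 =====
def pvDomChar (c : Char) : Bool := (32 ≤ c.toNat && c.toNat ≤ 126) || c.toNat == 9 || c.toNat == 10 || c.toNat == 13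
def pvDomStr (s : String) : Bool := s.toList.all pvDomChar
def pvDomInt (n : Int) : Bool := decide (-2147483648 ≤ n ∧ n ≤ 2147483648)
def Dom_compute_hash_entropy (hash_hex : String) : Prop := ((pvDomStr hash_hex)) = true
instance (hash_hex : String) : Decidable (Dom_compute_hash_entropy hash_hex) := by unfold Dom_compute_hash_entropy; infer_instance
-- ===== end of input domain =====

-- B replaces A's zero-padded binary string build + adjacent-character scan by a popcount
-- of the Gray code x ^ (x >> 1) masked to the field's w-1 adjacent bit pairs.

-- ===== PORT A =====
def compute_hash_entropy (hash_hex : String) : Int :=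
  if hash_hex.toList = [] ∨ PySem.Str.len hash_hex < 8 then 0
  else
    match PySem.Int.ofStrBase? hash_hex 16 with
    | none => 128      -- except (ValueError, OverflowError): int() raises only ValueError here
    | some hash_int =>
      let bit_length : Int := PySem.Str.len hash_hex * 4
      -- format(hash_int, f'0{bit_length}b'): PySem.Int.toBinChars is format(n,'b'); the
      -- '0'-padding of the format spec is sign-aware (zeros go after the '-'); ported by
      -- hand, exact for this format string.
      let digits := PySem.Int.toBinChars hash_int
      let binary : List Char :=
        if hash_int < 0 then
          '-' :: (List.replicate (bit_length.toNat - 1 - digits.tail.length) '0' ++ digits.tail)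
        else List.replicate (bit_length.toNat - digits.length) '0' ++ digits
      -- sum(1 for i in range(1, len(binary)) if binary[i] != binary[i-1])
      (PySem.List.pyRange 1 (PySem.List.len binary) 1).foldl
        (fun acc i => if PySem.List.pyGet? binary i ≠ PySem.List.pyGet? binary (i - 1) then acc + 1 else acc) 0

-- ===== PORT B =====
def compute_hash_entropy_alt (hash_hex : String) : Int :=
  if PySem.Str.len hash_hex < 8 then 0
  else
    match PySem.Int.ofStrBase? hash_hex 16 with
    | none => 128
    | some x =>
      let w : Nat := (PySem.Str.len hash_hex).toNat * 4    -- w = len(hash_hex) * 4 (len ≥ 0)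
      (PySem.Int.bitCount (PySem.Int.band (PySem.Int.bxor x (x >>> (1 : Nat))) ((1 <<< (w - 1)) - 1)) : Int)

-- ===== PRECONDITION & SPEC =====
-- Pre_ excludes strings of length ≥ 8 that int(·,16) accepts with a NEGATIVE value: no hash is
-- negative, and on such input A's value (which counts the boundary after the formatted minus
-- sign as a transition) is as arbitrary a reading of transition counting as B's (Gray-code
-- bits of the truncated field) — neither is a behaviour anyone would specify.
-- The second conjunct x < 16^len is vacuous (int() consumes at least one character per hex
-- digit, so every accepted value is below 16^len); it is stated only to keep Pre_ closed-form.
def Pre_compute_hash_entropy (hash_hex : String) : Prop :=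
  PySem.Str.len hash_hex < 8 ∨
    (0 ≤ (PySem.Int.ofStrBase? hash_hex 16).getD 0 ∧
      (PySem.Int.ofStrBase? hash_hex 16).getD 0 < 2 ^ (hash_hex.toList.length * 4))
instance (hash_hex : String) : Decidable (Pre_compute_hash_entropy hash_hex) := by
  unfold Pre_compute_hash_entropy; infer_instance

def pvWitness_compute_hash_entropy : String := "00000000"

def Spec_compute_hash_entropy (hash_hex : String) (out : Int) : Prop := out = compute_hash_entropy_alt hash_hex
instance (hash_hex : String) (out : Int) : Decidable (Spec_compute_hash_entropy hash_hex out) := by unfold Spec_compute_hash_entropy; infer_instance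

-- ===== CLAIM (what is proved, stated in full; the proofs are below) =====
def Claim_equal_compute_hash_entropy : Prop := ∀ (hash_hex : String), Dom_compute_hash_entropy hash_hex → Pre_compute_hash_entropy hash_hex → Spec_compute_hash_entropy hash_hex (compute_hash_entropy hash_hex)

-- ===== LEMMAS AND PROOFS =====

/-- The binary digit character of `m % 2`. -/
def bitChar (m : Nat) : Char := if m % 2 = 1 then '1' else '0'

/-- The low `w` bits of `m`, MSB first, as '0'/'1' characters. -/
def bitStr : Nat → Nat → List Char
  | 0, _ => []
  | w + 1, m => bitStr w (m / 2) ++ [bitChar m]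

/-- Number of adjacent unequal pairs in a list of characters. -/
def transC : List Char → Nat
  | [] => 0
  | [_] => 0
  | a :: b :: t => (if a ≠ b then 1 else 0) + transC (b :: t)

-- `Nat.toDigits 2` unfolding lemmas
theorem digitChar_mod_two (n : Nat) : (n % 2).digitChar = bitChar n := by
  have h : n % 2 = 0 ∨ n % 2 = 1 := by omega
  rcases h with h | h <;> simp [h, bitChar, Nat.digitChar]

theorem tdc_acc : ∀ (f n : Nat) (ds : List Char),
    Nat.toDigitsCore 2 f n ds = Nat.toDigitsCore 2 f n [] ++ ds := by
  intro f
  induction f with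
  | zero => intro n ds; simp [Nat.toDigitsCore]
  | succ g ih =>
    intro n ds
    simp only [Nat.toDigitsCore]
    by_cases h : n / 2 = 0
    · simp [h]
    · simp only [if_neg h]
      rw [ih (n / 2) ((n % 2).digitChar :: ds), ih (n / 2) [(n % 2).digitChar]]
      simp

theorem tdc_fuel_eq : ∀ (f g n : Nat) (ds : List Char), n < f → n < g →
    Nat.toDigitsCore 2 f n ds = Nat.toDigitsCore 2 g n ds := by
  intro f
  induction f with
  | zero => intro g n ds hf; omega
  | succ f' ih =>
    intro g n ds hf hg
    obtain ⟨g', rfl⟩ : ∃ g', g = g' + 1 := ⟨g - 1, by omega⟩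
    simp only [Nat.toDigitsCore]
    by_cases h : n / 2 = 0
    · simp [h]
    · simp only [if_neg h]
      exact ih g' (n / 2) _ (by omega) (by omega)

theorem toDigits_two_lt (n : Nat) (h : n < 2) : Nat.toDigits 2 n = [bitChar n] := by
  have h2 : n / 2 = 0 := by omega
  simp [Nat.toDigits, Nat.toDigitsCore, h2, digitChar_mod_two]

theorem toDigits_two_step (n : Nat) (h : 2 ≤ n) :
    Nat.toDigits 2 n = Nat.toDigits 2 (n / 2) ++ [bitChar n] := by
  have h2 : n / 2 ≠ 0 := by omega
  have hstep : ∀ (f m : Nat) (ds : List Char), Nat.toDigitsCore 2 (f + 1) m ds =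
      if m / 2 = 0 then (m % 2).digitChar :: ds
      else Nat.toDigitsCore 2 f (m / 2) ((m % 2).digitChar :: ds) := fun f m ds => rfl
  simp only [Nat.toDigits]
  rw [hstep, if_neg h2, tdc_acc, tdc_fuel_eq n (n / 2 + 1) (n / 2) [] (by omega) (by omega),
    digitChar_mod_two]

theorem bitStr_zero (w : Nat) : bitStr w 0 = List.replicate w '0' := by
  induction w with
  | zero => rfl
  | succ w ih => rw [List.replicate_succ']; simp [bitStr, ih]; rfl

theorem pad_eq_bitStr (w : Nat) : ∀ m : Nat, m < 2 ^ w → 1 ≤ w →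
    List.replicate (w - (Nat.toDigits 2 m).length) '0' ++ Nat.toDigits 2 m = bitStr w m := by
  induction w with
  | zero => intro m hm hw; omega
  | succ w ih =>
    intro m hm hw
    by_cases h2 : m < 2
    · rw [toDigits_two_lt m h2]
      have h0 : m / 2 = 0 := by omega
      simp only [bitStr, h0, bitStr_zero, List.length_singleton]
      rfl
    · have hpow : 2 ^ (w + 1) = 2 * 2 ^ w := by ring
      have hw1 : 1 ≤ w := by
        rcases Nat.eq_zero_or_pos w with h | h
        · exfalso; subst h
          have : m < 2 := by simpa using hm
          omega
        · exact h
      have hm2 : m / 2 < 2 ^ w := by omega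
      rw [toDigits_two_step m (by omega), List.length_append]
      have harith : w + 1 - ((Nat.toDigits 2 (m / 2)).length + [bitChar m].length)
          = w - (Nat.toDigits 2 (m / 2)).length := by simp
      rw [harith, ← List.append_assoc, ih (m / 2) hm2 hw1]
      rfl

theorem trans_snoc (l : List Char) (a : Char) :
    transC (l ++ [a]) = transC l +
      (match l.getLast? with | none => 0 | some b => if b ≠ a then 1 else 0) := by
  induction l with
  | nil => simp [transC]
  | cons x xs ih =>
    cases xs with
    | nil => simp [transC]
    | cons y t =>
      have hlast : (x :: y :: t).getLast? = (y :: t).getLast? := List.getLast?_cons_cons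
      simp only [List.cons_append, transC] at ih ⊢
      rw [ih, hlast]
      omega

theorem pyGet?_append_left (t : List Char) (a : Char) (j : Int) (h0 : 0 ≤ j)
    (hj : j < (t.length : Int)) : PySem.List.pyGet? (t ++ [a]) j = PySem.List.pyGet? t j := by
  rw [PySem.List.pyGet?_of_nonneg (t ++ [a]) h0, PySem.List.pyGet?_of_nonneg t h0,
    List.getElem?_append_left (by omega)]

theorem foldl_range_trans (l : List Char) :
    (PySem.List.pyRange 1 (l.length : Int) 1).foldl
      (fun acc i => if PySem.List.pyGet? l i ≠ PySem.List.pyGet? l (i - 1) then acc + 1 else acc) (0 : Int)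
      = (transC l : Int) := by
  induction l using List.reverseRecOn with
  | nil => rfl
  | append_singleton t a ih =>
    cases t with
    | nil => rfl
    | cons c0 t0 =>
      set t := c0 :: t0 with ht
      have htne : t ≠ [] := by simp [ht]
      have hlen1 : 1 ≤ (t.length : Int) := by simp [ht]
      have hcast : ((t ++ [a]).length : Int) = (t.length : Int) + 1 := by
        simp
      rw [hcast, PySem.List.pyRange_one_succ_right hlen1, List.foldl_append]
      have hinner : (PySem.List.pyRange 1 (t.length : Int) 1).foldl
          (fun acc i => if PySem.List.pyGet? (t ++ [a]) i ≠ PySem.List.pyGet? (t ++ [a]) (i - 1) then acc + 1 else acc) (0 : Int)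
          = (PySem.List.pyRange 1 (t.length : Int) 1).foldl
          (fun acc i => if PySem.List.pyGet? t i ≠ PySem.List.pyGet? t (i - 1) then acc + 1 else acc) (0 : Int) := by
        apply PySem.List.foldl_congr_mem
        intro acc i hi
        rw [PySem.List.mem_pyRange_one] at hi
        rw [pyGet?_append_left t a i (by omega) (by omega),
          pyGet?_append_left t a (i - 1) (by omega) (by omega)]
      rw [hinner, ih]
      have hlast : PySem.List.pyGet? (t ++ [a]) (t.length : Int) = some a := by
        simp
      have hprev : PySem.List.pyGet? (t ++ [a]) ((t.length : Int) - 1) = t.getLast? := by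
        rw [show ((t.length : Int) - 1) = ((t.length - 1 : Nat) : Int) by
              rw [ht]; simp,
          PySem.List.pyGet?_natCast (t ++ [a]) (t.length - 1), List.getElem?_append_left (by rw [ht]; simp),
          List.getLast?_eq_getElem?]
      obtain ⟨b, hb⟩ : ∃ b, t.getLast? = some b := by
        cases h : t.getLast? with
        | none => exact absurd (List.getLast?_eq_none_iff.mp h) htne
        | some b => exact ⟨b, rfl⟩
      rw [trans_snoc, hb]
      simp only [List.foldl_cons, List.foldl_nil, hlast, hprev, hb]
      by_cases hba : b = a
      · simp [hba]
      · rw [if_pos (by simpa using Ne.symm hba), if_pos hba]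
        push_cast
        ring

-- popcount of a natural number, through PySem.Int.bitCount
theorem mod_pow_succ_split (k z : Nat) : z % 2 ^ (k + 1) = z % 2 + 2 * (z / 2 % 2 ^ k) := by
  have h : 2 ^ (k + 1) = 2 * 2 ^ k := by ring
  rw [h, Nat.mod_mul]

theorem bitCount_bit (b v : Nat) (hb : b < 2) :
    PySem.Int.bitCount ((b + 2 * v : Nat) : Int) = b + PySem.Int.bitCount (v : Int) := by
  rcases Nat.eq_zero_or_pos (b + 2 * v) with h0 | hpos
  · have hb0 : b = 0 := by omega
    have hv0 : v = 0 := by omega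
    simp [hb0, hv0, PySem.Int.bitCount_zero]
  · rw [PySem.Int.bitCount_natCast hpos]
    have h1 : (b + 2 * v) % 2 = b := by omega
    have h2 : (b + 2 * v) / 2 = v := by omega
    rw [h1, h2]

theorem transC_bitStr (W : Nat) : ∀ m : Nat,
    transC (bitStr W m) = PySem.Int.bitCount (((m ^^^ m / 2) % 2 ^ (W - 1) : Nat) : Int) := by
  induction W using Nat.strong_induction_on with
  | _ W ih =>
    intro m
    match W with
    | 0 => simp [bitStr, transC, PySem.Int.bitCount_zero]
    | 1 => simp [bitStr, transC, PySem.Int.bitCount_zero]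
    | w + 2 =>
      have hunf : bitStr (w + 2) m = bitStr (w + 1) (m / 2) ++ [bitChar m] := rfl
      have hlast : (bitStr (w + 1) (m / 2)).getLast? = some (bitChar (m / 2)) := by
        have : bitStr (w + 1) (m / 2) = bitStr w (m / 2 / 2) ++ [bitChar (m / 2)] := rfl
        rw [this, List.getLast?_concat]
      rw [hunf, trans_snoc, hlast, ih (w + 1) (by omega) (m / 2)]
      dsimp only
      set z := m ^^^ m / 2 with hz
      have hsplit : z % 2 ^ (w + 2 - 1) = z % 2 + 2 * (z / 2 % 2 ^ w) := by
        have : w + 2 - 1 = w + 1 := by omega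
        rw [this, mod_pow_succ_split]
      rw [hsplit, bitCount_bit (z % 2) (z / 2 % 2 ^ w) (by omega)]
      have hdiv : z / 2 = m / 2 ^^^ m / 2 / 2 := by rw [hz, Nat.xor_div_two]
      have hw1 : w + 1 - 1 = w := by omega
      rw [hdiv, hw1]
      have hmod : z % 2 = if bitChar (m / 2) ≠ bitChar m then 1 else 0 := by
        rw [hz]
        have hx : (m ^^^ m / 2) % 2 ^ 1 = m % 2 ^ 1 ^^^ m / 2 % 2 ^ 1 := Nat.xor_mod_two_pow
        simp only [pow_one] at hx
        rw [hx]
        have h1 : m % 2 = 0 ∨ m % 2 = 1 := by omega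
        have h2 : m / 2 % 2 = 0 ∨ m / 2 % 2 = 1 := by omega
        unfold bitChar
        rcases h1 with h1 | h1 <;> rcases h2 with h2 | h2 <;> simp [h1, h2]
      rw [hmod]
      omega

theorem b_expr_eq (m F : Nat) :
    PySem.Int.bitCount (PySem.Int.band (PySem.Int.bxor (m : Int) ((m : Int) >>> (1 : Nat))) ((1 <<< (F - 1)) - 1))
      = PySem.Int.bitCount (((m ^^^ m / 2) % 2 ^ (F - 1) : Nat) : Int) := by
  have h1 : ((m : Int) >>> (1 : Nat)) = ((m / 2 : Nat) : Int) := by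
    simp [Int.shiftRight_eq_div_pow]
  have h2 : ((1 <<< (F - 1) : Nat) : Int) - 1 = (((2 ^ (F - 1) - 1 : Nat)) : Int) := by
    rw [Nat.one_shiftLeft]
    push_cast [Nat.one_le_two_pow]
    ring
  rw [h1, PySem.Int.bxor_natCast, h2, PySem.Int.band_natCast,
    Nat.and_two_pow_sub_one_eq_mod]

-- ===== VERDICT (by name: the statement is the Claim_ definition above) =====
theorem compute_hash_entropy_spec : Claim_equal_compute_hash_entropy := by
  intro s _ hpre
  unfold Spec_compute_hash_entropy compute_hash_entropy compute_hash_entropy_alt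
  by_cases h8 : PySem.Str.len s < 8
  · rw [if_pos (Or.inr h8), if_pos h8]
  · have hlen : (8 : Int) ≤ (s.toList.length : Int) := by
      rw [PySem.Str.len_eq] at h8; omega
    have hne : ¬(s.toList = [] ∨ PySem.Str.len s < 8) := by
      rintro (h | h)
      · rw [PySem.Str.len_eq, h] at h8; simp at h8
      · exact h8 h
    simp only [if_neg hne, if_neg h8]
    cases hp : PySem.Int.ofStrBase? s 16 with
    | none => rfl
    | some x =>
      dsimp only
      rcases hpre with hpre | hpre
      · exact absurd hpre h8
      rw [hp] at hpre
      obtain ⟨hx0, hxlt⟩ := hpre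
      simp only [Option.getD_some] at hx0 hxlt
      obtain ⟨m, rfl⟩ := Int.eq_ofNat_of_zero_le hx0
      have hn8 : (8 : Nat) ≤ s.toList.length := by exact_mod_cast hlen
      set W : Nat := s.toList.length * 4 with hW
      have hWnat : (PySem.Str.len s * 4).toNat = W := by
        rw [PySem.Str.len_eq]; omega
      have hwB : (PySem.Str.len s).toNat * 4 = W := by
        rw [PySem.Str.len_eq]; omega
      -- the value fits in the W-bit field, so bitLength m ≤ W
      have hmW : m < 2 ^ W := by
        have : ((m : Int)) < ((2 ^ W : Nat) : Int) := by
          push_cast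
          exact_mod_cast hxlt
        exact_mod_cast this
      have hLW : PySem.Int.bitLength (m : Int) ≤ W := by
        rcases Nat.eq_zero_or_pos m with h0 | h1
        · subst h0; simp [PySem.Int.bitLength_zero]
        · by_contra hc
          have hge : 2 ^ W ≤ 2 ^ (PySem.Int.bitLength (m : Int) - 1) :=
            Nat.pow_le_pow_right (by omega) (by omega)
          have hle := PySem.Int.two_pow_bitLength_le (m : Int) (by exact_mod_cast h1.ne')
          rw [Int.natAbs_natCast] at hle
          omega
      have htb : PySem.Int.toBinChars (m : Int) = Nat.toDigits 2 m := by
        unfold PySem.Int.toBinChars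
        rw [if_neg (by omega)]
        simp
      have hpad : List.replicate (W - (Nat.toDigits 2 m).length) '0' ++ Nat.toDigits 2 m
          = bitStr W m := pad_eq_bitStr W m hmW (by omega)
      rw [if_neg (show ¬ ((m : Int) < 0) by omega)]
      simp only [htb, hWnat, hwB, hpad, PySem.List.len_eq]
      rw [foldl_range_trans, transC_bitStr, b_expr_eq]
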